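-- pv_equiv track=rewrite | github.com/lunadong/paper-agent | area_summary/generate_html.py | _categorize_ordered_topics
-- ===== SOURCE A (Python) =====
-- def summary_file_key(topic_type, topic_id):
--     """Map (type, id) to the expected summary JSON filename stem."""
--     if topic_type == "sub_topic":
--         return f"subtopic_{topic_id}"
--     elif topic_type == "category_general":
--         return f"category_{topic_id}"
--     else:
--         return f"theme_{topic_id}"
--
-- def _categorize_ordered_topics(ordered_topics, topic_summaries):
--     """Categorize ordered topics into cats, subs, and themes lists.
--
--     Returns tuple of (cats, subs, themes) where each is a list of (emoji, name, anchor).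
--     """
--     cats = []
--     subs = []
--     themes = []
--     for topic_type, topic_id, emoji_icon in ordered_topics:
--         key = summary_file_key(topic_type, topic_id)
--         ts = topic_summaries.get(key)
--         if not ts:
--             continue
--         name = ts.get("topic_name", topic_id)
--         anchor = ts.get("topic_id", topic_id)
--         entry = (emoji_icon, name, anchor)
--         if topic_type == "category_general":
--             cats.append(entry)
--         elif topic_type == "sub_topic":
--             subs.append(entry)
--         else:
--             themes.append(entry)
--     return cats, subs, themes
-- ===== SOURCE B (Python) =====
-- def summary_file_key(topic_type, topic_id):
--     """Map (type, id) to the expected summary JSON filename stem."""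
--     if topic_type == "sub_topic":
--         return f"subtopic_{topic_id}"
--     elif topic_type == "category_general":
--         return f"category_{topic_id}"
--     else:
--         return f"theme_{topic_id}"
--
-- def _entry_for(row, topic_summaries):
--     """Turn one ordered-topics row into an entry, or None if its summary is missing/empty."""
--     topic_type, topic_id, emoji_icon = row
--     ts = topic_summaries.get(summary_file_key(topic_type, topic_id))
--     if not ts:
--         return None
--     return (emoji_icon, ts.get("topic_name", topic_id), ts.get("topic_id", topic_id))
--
-- def _categorize_ordered_topics(ordered_topics, topic_summaries):
--     """Categorize ordered topics into cats, subs, and themes lists.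
--
--     Returns tuple of (cats, subs, themes) where each is a list of (emoji, name, anchor).
--     """
--     def bucket(pred):
--         return [e for e in (_entry_for(row, topic_summaries)
--                             for row in ordered_topics if pred(row[0]))
--                 if e is not None]
--     cats = bucket(lambda t: t == "category_general")
--     subs = bucket(lambda t: t == "sub_topic")
--     themes = bucket(lambda t: t != "category_general" and t != "sub_topic")
--     return cats, subs, themes
-- ===== Notes on version B (the rewrite author's own statement) =====
-- stated objective: simpler
-- what changed: Replaces the single interleaved loop with stateful appends by three independent filter-and-collect passes over ordered_topics (one per output list), sharing a row-to-entry helper.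
import Mathlib
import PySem

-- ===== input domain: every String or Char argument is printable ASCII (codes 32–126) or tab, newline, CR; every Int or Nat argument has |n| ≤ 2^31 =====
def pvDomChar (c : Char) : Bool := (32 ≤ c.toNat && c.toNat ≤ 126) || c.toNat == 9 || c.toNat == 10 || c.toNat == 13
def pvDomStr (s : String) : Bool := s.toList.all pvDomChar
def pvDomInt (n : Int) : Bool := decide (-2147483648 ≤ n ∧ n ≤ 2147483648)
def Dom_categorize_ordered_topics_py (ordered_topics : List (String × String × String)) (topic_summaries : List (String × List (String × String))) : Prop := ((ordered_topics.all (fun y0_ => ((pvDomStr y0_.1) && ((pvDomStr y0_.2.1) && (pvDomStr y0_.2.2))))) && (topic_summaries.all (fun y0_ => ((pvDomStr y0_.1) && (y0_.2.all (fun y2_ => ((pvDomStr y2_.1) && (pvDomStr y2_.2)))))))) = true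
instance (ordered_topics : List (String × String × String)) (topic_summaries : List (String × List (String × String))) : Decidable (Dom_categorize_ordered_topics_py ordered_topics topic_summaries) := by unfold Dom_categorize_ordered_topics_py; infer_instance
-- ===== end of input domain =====

-- ===== PORT A =====
-- B replaces A's single interleaved loop by three independent filter-and-collect
-- passes sharing a row-to-entry helper; same cost, simpler decomposition.
def summary_file_key (topic_type topic_id : String) : String :=
  if topic_type == "sub_topic" then "subtopic_" ++ topic_id
  else if topic_type == "category_general" then "category_" ++ topic_id
  else "theme_" ++ topic_id

def categorize_ordered_topics_py_step (topic_summaries : List (String × List (String × String)))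
    (st : (List (String × String × String)) × (List (String × String × String)) × (List (String × String × String)))
    (row : String × String × String) :
    (List (String × String × String)) × (List (String × String × String)) × (List (String × String × String)) :=
  let key := summary_file_key row.1 row.2.1
  match (PySem.Dict.mk topic_summaries).get? key with
  | none => st
  | some ts =>
    if ts.isEmpty then st   -- Python's 'if not ts: continue' (empty dict is falsy)
    else
      let name := (PySem.Dict.mk ts).getD "topic_name" row.2.1
      let anchor := (PySem.Dict.mk ts).getD "topic_id" row.2.1
      let entry := (row.2.2, name, anchor)
      if row.1 == "category_general" then (st.1 ++ [entry], st.2.1, st.2.2)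
      else if row.1 == "sub_topic" then (st.1, st.2.1 ++ [entry], st.2.2)
      else (st.1, st.2.1, st.2.2 ++ [entry])

def categorize_ordered_topics_py (ordered_topics : List (String × String × String)) (topic_summaries : List (String × List (String × String))) : (List (String × String × String)) × (List (String × String × String)) × (List (String × String × String)) :=
  ordered_topics.foldl (categorize_ordered_topics_py_step topic_summaries) ([], [], [])

-- ===== PORT B =====
def summary_file_key_alt (topic_type topic_id : String) : String :=
  if topic_type == "sub_topic" then "subtopic_" ++ topic_id
  else if topic_type == "category_general" then "category_" ++ topic_id
  else "theme_" ++ topic_id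

def entry_for_alt (row : String × String × String) (topic_summaries : List (String × List (String × String))) : Option (String × String × String) :=
  match (PySem.Dict.mk topic_summaries).get? (summary_file_key_alt row.1 row.2.1) with
  | none => none
  | some ts =>
    if ts.isEmpty then none
    else some (row.2.2, (PySem.Dict.mk ts).getD "topic_name" row.2.1, (PySem.Dict.mk ts).getD "topic_id" row.2.1)

def bucket_alt (ordered_topics : List (String × String × String)) (topic_summaries : List (String × List (String × String))) (pred : String → Bool) : List (String × String × String) :=
  ordered_topics.filterMap (fun row => if pred row.1 then entry_for_alt row topic_summaries else none)

def categorize_ordered_topics_py_alt (ordered_topics : List (String × String × String)) (topic_summaries : List (String × List (String × String))) : (List (String × String × String)) × (List (String × String × String)) × (List (String × String × String)) :=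
  (bucket_alt ordered_topics topic_summaries (fun t => t == "category_general"),
   bucket_alt ordered_topics topic_summaries (fun t => t == "sub_topic"),
   bucket_alt ordered_topics topic_summaries (fun t => t != "category_general" && t != "sub_topic"))

-- ===== PRECONDITION & SPEC =====
def Spec_categorize_ordered_topics_py (ordered_topics : List (String × String × String)) (topic_summaries : List (String × List (String × String))) (out : (List (String × String × String)) × (List (String × String × String)) × (List (String × String × String))) : Prop := out = categorize_ordered_topics_py_alt ordered_topics topic_summaries
instance (ordered_topics : List (String × String × String)) (topic_summaries : List (String × List (String × String))) (out : (List (String × String × String)) × (List (String × String × String)) × (List (String × String × String))) : Decidable (Spec_categorize_ordered_topics_py ordered_topics topic_summaries out) := by unfold Spec_categorize_ordered_topics_py; infer_instance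

-- ===== CLAIM (what is proved, stated in full; the proofs are below) =====
def Claim_equal_categorize_ordered_topics_py : Prop := ∀ (ordered_topics : List (String × String × String)) (topic_summaries : List (String × List (String × String))), Dom_categorize_ordered_topics_py ordered_topics topic_summaries → Spec_categorize_ordered_topics_py ordered_topics topic_summaries (categorize_ordered_topics_py ordered_topics topic_summaries)

-- ===== LEMMAS AND PROOFS =====
-- One step of A's loop appends the row's entry (if any) to the bucket B assigns it to.
theorem categorize_step_eq (tss : List (String × List (String × String))) (row : String × String × String)
    (c s t : List (String × String × String)) :
    categorize_ordered_topics_py_step tss (c, s, t) row =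
      (c ++ (if row.1 == "category_general" then (entry_for_alt row tss).toList else []),
       s ++ (if row.1 == "sub_topic" then (entry_for_alt row tss).toList else []),
       t ++ (if row.1 != "category_general" && row.1 != "sub_topic" then (entry_for_alt row tss).toList else [])) := by
  have hk : summary_file_key_alt row.1 row.2.1 = summary_file_key row.1 row.2.1 := rfl
  unfold categorize_ordered_topics_py_step entry_for_alt
  rw [hk]
  cases hg : (PySem.Dict.mk tss).get? (summary_file_key row.1 row.2.1) with
  | none => simp only [hg]; simp
  | some ts =>
    by_cases hts : ts.isEmpty
    · simp only [hg]; simp [hts]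
    · by_cases h1 : row.1 = "category_general"
      · simp only [hg]; simp [hts, h1]
      · by_cases h2 : row.1 = "sub_topic"
        · simp only [hg]; simp [hts, h2]
        · simp only [hg]; simp [hts, h1, h2]

theorem bucket_alt_cons (row : String × String × String) (rest : List (String × String × String))
    (tss : List (String × List (String × String))) (p : String → Bool) :
    bucket_alt (row :: rest) tss p =
      (if p row.1 then (entry_for_alt row tss).toList else []) ++ bucket_alt rest tss p := by
  unfold bucket_alt
  simp only [List.filterMap_cons]
  by_cases hp : p row.1
  · simp only [hp, if_true]
    cases entry_for_alt row tss <;> simp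
  · simp [hp]

-- Loop invariant: A's fold starting from accumulators (c, s, t) appends exactly B's buckets.
theorem categorize_foldl_invariant (tss : List (String × List (String × String)))
    (ots : List (String × String × String)) (c s t : List (String × String × String)) :
    ots.foldl (categorize_ordered_topics_py_step tss) (c, s, t) =
      (c ++ bucket_alt ots tss (fun x => x == "category_general"),
       s ++ bucket_alt ots tss (fun x => x == "sub_topic"),
       t ++ bucket_alt ots tss (fun x => x != "category_general" && x != "sub_topic")) := by
  induction ots generalizing c s t with
  | nil => simp [bucket_alt]
  | cons row rest ih =>
    simp only [List.foldl_cons]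
    rw [categorize_step_eq, ih]
    simp only [bucket_alt_cons, List.append_assoc]

-- ===== VERDICT (by name: the statement is the Claim_ definition above) =====
theorem categorize_ordered_topics_py_spec : Claim_equal_categorize_ordered_topics_py := by
  intro ordered_topics topic_summaries _
  unfold Spec_categorize_ordered_topics_py categorize_ordered_topics_py categorize_ordered_topics_py_alt
  rw [categorize_foldl_invariant]
  simp
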